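-- pv_equiv track=rewrite | github.com/hnthedev/Hoa-Hoc | websource/balance.py | tach_chat
-- ===== SOURCE A (Python) =====
-- def tach_chat(s,index,a,l):
-- 	i = 0
-- 	while i <= len(s) - 1:
-- 		chat = ""
-- 		heso = 1
--
-- 		if i+1 <= len(s) - 1 and s[i+1].isnumeric() == False and s[i+1].isupper() == False:
-- 			chat = s[i] + s[i+1]
-- 			i += 2
-- 		else:
-- 			chat = s[i]
-- 			i += 1
--
-- 		if i <= len(s) - 1 and s[i].isnumeric():
-- 			if i+1 <= len(s) -1 and s[i+1].isnumeric():
-- 				heso = int(s[i]+s[i+1])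
-- 				i += 2
-- 			else:
-- 				heso = int(s[i])
-- 				i += 1
-- 		else:
-- 			heso = 1
--
-- 		if not chat in a:
-- 			a[chat] = [f"x{index+l}={heso}"]
-- 		else:
-- 			a[chat].append(f"x{index+l}={heso}")
-- 	return a
-- ===== SOURCE B (Python) =====
-- def _split_heso(stack):
--     # pops up to two digit characters off the stack (top = stack[-1]) and returns the coefficient
--     if len(stack) >= 2 and stack[-1].isnumeric() and stack[-2].isnumeric():
--         return int(stack.pop() + stack.pop())
--     if len(stack) >= 1 and stack[-1].isnumeric():
--         return int(stack.pop())
--     return 1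
--
--
-- def _tokens(cs):
--     # tokenize into (element, coefficient) pairs; the remaining input is a stack, top = next char
--     stack = cs[::-1]
--     out = []
--     while stack:
--         c1 = stack.pop()
--         if stack and not stack[-1].isnumeric() and not stack[-1].isupper():
--             chat = c1 + stack.pop()
--         else:
--             chat = c1
--         out.append((chat, _split_heso(stack)))
--     return out
--
--
-- def tach_chat(s, index, a, l):
--     for chat, heso in _tokens(list(s)):
--         a.setdefault(chat, []).append(f"x{index+l}={heso}")
--     return a
-- ===== Notes on version B (the rewrite author's own statement) =====
-- stated objective: alternative
-- what changed: B replaces A's single index-arithmetic while-loop that interleaves scanning and dict mutation by a two-phase design: a stack-based tokenizer pattern-matching the remaining characters into (element, coefficient) pairs, then one fold inserting the pairs into the dict via setdefault.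
import Mathlib
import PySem

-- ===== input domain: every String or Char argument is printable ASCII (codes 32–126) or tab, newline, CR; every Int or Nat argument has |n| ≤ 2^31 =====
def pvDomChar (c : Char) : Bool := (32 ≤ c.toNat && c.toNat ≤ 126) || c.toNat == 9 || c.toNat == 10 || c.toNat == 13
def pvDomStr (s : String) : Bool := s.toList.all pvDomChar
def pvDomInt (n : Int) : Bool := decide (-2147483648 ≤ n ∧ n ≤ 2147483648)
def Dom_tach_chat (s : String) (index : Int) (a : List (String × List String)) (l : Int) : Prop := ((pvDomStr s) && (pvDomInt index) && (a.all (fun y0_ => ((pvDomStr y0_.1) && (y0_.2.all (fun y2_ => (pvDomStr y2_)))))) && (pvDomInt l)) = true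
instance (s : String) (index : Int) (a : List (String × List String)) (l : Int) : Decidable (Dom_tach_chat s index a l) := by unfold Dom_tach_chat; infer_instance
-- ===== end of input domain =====

-- B replaces A's index-arithmetic while-loop (scan + dict mutation interleaved) by a two-phase
-- design: pattern-match tokenizer producing (element, coefficient) pairs, then one fold into the dict.
-- Note: the Python A mutates its dict argument in place; Python B performs the same mutation; the
-- equivalence proved here is about the return value.
-- s[...].isnumeric() is ported as PySem.Chars.isdigit and int(...) as PySem.Int.ofChars? — exact on
-- the printable-ASCII domain Dom_tach_chat.

-- ===== PORT A =====
-- a[chat].append(x): append to the value of the first (unique, as a is a Python dict) matching key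
def pvModifyFirst : List (String × List String) → String → String → List (String × List String)
  | [], _, _ => []
  | p :: rest, k, x => if p.1 == k then (p.1, p.2 ++ [x]) :: rest else p :: pvModifyFirst rest k x

def tachLoopA (cs : List Char) (index l : Int) (i : Nat) (a : List (String × List String)) :
    List (String × List String) :=
  if i < cs.length then  -- while i <= len(s) - 1  (indices stay ≥ 0, so Nat i; s[..] via getD, in range under the guards)
    let chat_i1 : String × Nat :=
      if i+1 < cs.length ∧ PySem.Chars.isdigit (cs.getD (i+1) ' ') = false
           ∧ PySem.Chars.isupper (cs.getD (i+1) ' ') = false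
      then (String.mk [cs.getD i ' ', cs.getD (i+1) ' '], i+2)
      else (String.mk [cs.getD i ' '], i+1)
    let i1 := chat_i1.2
    let heso_i2 : Int × Nat :=
      if i1 < cs.length ∧ PySem.Chars.isdigit (cs.getD i1 ' ') = true then
        if i1+1 < cs.length ∧ PySem.Chars.isdigit (cs.getD (i1+1) ' ') = true then
          ((PySem.Int.ofChars? [cs.getD i1 ' ', cs.getD (i1+1) ' ']).getD 0, i1+2)
        else ((PySem.Int.ofChars? [cs.getD i1 ' ']).getD 0, i1+1)
      else (1, i1)
    let x := "x" ++ PySem.Int.toStr (index + l) ++ "=" ++ PySem.Int.toStr heso_i2.1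
    let a' := if a.any (fun p => p.1 == chat_i1.1) = false
              then a ++ [(chat_i1.1, [x])]
              else pvModifyFirst a chat_i1.1 x
    tachLoopA cs index l heso_i2.2 a'
  else a
termination_by cs.length - i
decreasing_by
  split <;> split <;> (try split) <;> simp <;> omega

def tach_chat (s : String) (index : Int) (a : List (String × List String)) (l : Int) :
    List (String × List String) :=
  tachLoopA s.toList index l 0 a

-- ===== PORT B =====
-- Source B keeps the remaining input as a Python list used as a stack (top = last element, popping the
-- next character); the port represents that stack as the remaining characters in forward order, so
-- stack[-1]/pop() become head/tail pattern matches.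
def pvSplitChat (c1 : Char) (rest0 : List Char) : String × List Char :=
  match rest0 with
  | c2 :: r => if PySem.Chars.isdigit c2 = false ∧ PySem.Chars.isupper c2 = false
               then (String.mk [c1, c2], r) else (String.mk [c1], c2 :: r)
  | [] => (String.mk [c1], [])

def pvSplitHeso (rest : List Char) : Int × List Char :=
  match rest with
  | d1 :: d2 :: r =>
      if PySem.Chars.isdigit d1 = true ∧ PySem.Chars.isdigit d2 = true then
        ((PySem.Int.ofChars? [d1, d2]).getD 0, r)
      else if PySem.Chars.isdigit d1 = true then ((PySem.Int.ofChars? [d1]).getD 0, d2 :: r)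
      else (1, d1 :: d2 :: r)
  | [d1] => if PySem.Chars.isdigit d1 = true then ((PySem.Int.ofChars? [d1]).getD 0, []) else (1, [d1])
  | [] => (1, [])

theorem pvSplitChat_len (c1 : Char) (r0 : List Char) :
    (pvSplitChat c1 r0).2.length ≤ r0.length := by
  rcases r0 with _ | ⟨c2, r⟩ <;> simp only [pvSplitChat] <;> (try split_ifs) <;> simp

theorem pvSplitHeso_len (r : List Char) : (pvSplitHeso r).2.length ≤ r.length := by
  rcases r with _ | ⟨d1, _ | ⟨d2, rr⟩⟩ <;> simp only [pvSplitHeso] <;> (try split_ifs) <;>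
    simp <;> omega

def pvTokens : List Char → List (String × Int)
  | [] => []
  | c1 :: r0 =>
      let p := pvSplitChat c1 r0
      let q := pvSplitHeso p.2
      (p.1, q.1) :: pvTokens q.2
termination_by cs => cs.length
decreasing_by
  have h1 := pvSplitChat_len c1 r0
  have h2 := pvSplitHeso_len (pvSplitChat c1 r0).2
  simp; omega

def pvSetdefaultAppend (a : List (String × List String)) (k x : String) :
    List (String × List String) :=
  if a.any (fun p => p.1 == k) then pvModifyFirst a k x else a ++ [(k, [x])]

def tach_chat_alt (s : String) (index : Int) (a : List (String × List String)) (l : Int) :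
    List (String × List String) :=
  (pvTokens s.toList).foldl
    (fun acc t =>
      pvSetdefaultAppend acc t.1 ("x" ++ PySem.Int.toStr (index + l) ++ "=" ++ PySem.Int.toStr t.2))
    a

-- ===== PRECONDITION & SPEC =====
def Spec_tach_chat (s : String) (index : Int) (a : List (String × List String)) (l : Int) (out : List (String × List String)) : Prop := out = tach_chat_alt s index a l
instance (s : String) (index : Int) (a : List (String × List String)) (l : Int) (out : List (String × List String)) : Decidable (Spec_tach_chat s index a l out) := by unfold Spec_tach_chat; infer_instance

-- ===== CLAIM (what is proved, stated in full; the proofs are below) =====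
def Claim_equal_tach_chat : Prop := ∀ (s : String) (index : Int) (a : List (String × List String)) (l : Int), Dom_tach_chat s index a l → Spec_tach_chat s index a l (tach_chat s index a l)

-- ===== LEMMAS AND PROOFS =====
theorem chat_corr (cs : List Char) (i : Nat) :
    pvSplitChat (cs.getD i ' ') (cs.drop (i+1)) =
      (if i+1 < cs.length ∧ PySem.Chars.isdigit (cs.getD (i+1) ' ') = false
            ∧ PySem.Chars.isupper (cs.getD (i+1) ' ') = false
       then (String.mk [cs.getD i ' ', cs.getD (i+1) ' '], cs.drop (i+2))
       else (String.mk [cs.getD i ' '], cs.drop (i+1))) := by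
  by_cases h2 : i+1 < cs.length
  · have hc : cs.drop (i+1) = cs[i+1] :: cs.drop (i+2) := List.drop_eq_getElem_cons h2
    have hg : cs.getD (i+1) ' ' = cs[i+1] := List.getD_eq_getElem cs ' ' h2
    rw [hc, hg]
    by_cases hdu : PySem.Chars.isdigit cs[i+1] = false ∧ PySem.Chars.isupper cs[i+1] = false
    · simp only [pvSplitChat, if_pos hdu, if_pos (⟨h2, hdu.1, hdu.2⟩ :
        i+1 < cs.length ∧ PySem.Chars.isdigit cs[i+1] = false ∧ PySem.Chars.isupper cs[i+1] = false)]
    · simp only [pvSplitChat, if_neg hdu,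
        if_neg (fun hx => hdu ⟨hx.2.1, hx.2.2⟩ :
          ¬(i+1 < cs.length ∧ PySem.Chars.isdigit cs[i+1] = false ∧
            PySem.Chars.isupper cs[i+1] = false))]
  · have hnil : cs.drop (i+1) = [] := List.drop_eq_nil_of_le (by omega)
    rw [hnil]
    simp only [pvSplitChat, if_neg (fun hx => h2 hx.1 :
      ¬(i+1 < cs.length ∧ PySem.Chars.isdigit (cs.getD (i+1) ' ') = false ∧
        PySem.Chars.isupper (cs.getD (i+1) ' ') = false))]

theorem heso_corr (cs : List Char) (i1 : Nat) :
    pvSplitHeso (cs.drop i1) =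
      (if i1 < cs.length ∧ PySem.Chars.isdigit (cs.getD i1 ' ') = true then
         if i1+1 < cs.length ∧ PySem.Chars.isdigit (cs.getD (i1+1) ' ') = true then
           ((PySem.Int.ofChars? [cs.getD i1 ' ', cs.getD (i1+1) ' ']).getD 0, cs.drop (i1+2))
         else ((PySem.Int.ofChars? [cs.getD i1 ' ']).getD 0, cs.drop (i1+1))
       else (1, cs.drop i1)) := by
  by_cases h1 : i1 < cs.length
  · have hg1 : cs.getD i1 ' ' = cs[i1] := List.getD_eq_getElem cs ' ' h1
    by_cases h2 : i1+1 < cs.length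
    · have hg2 : cs.getD (i1+1) ' ' = cs[i1+1] := List.getD_eq_getElem cs ' ' h2
      have hc1 : cs.drop i1 = cs[i1] :: cs[i1+1] :: cs.drop (i1+2) := by
        rw [List.drop_eq_getElem_cons h1, List.drop_eq_getElem_cons h2]
      rw [hc1, hg1, hg2]
      by_cases hd1 : PySem.Chars.isdigit cs[i1] = true
      · by_cases hd2 : PySem.Chars.isdigit cs[i1+1] = true
        · simp only [pvSplitHeso, if_pos (⟨hd1, hd2⟩ : _ ∧ _),
            if_pos (⟨h1, hd1⟩ : _ ∧ _), if_pos (⟨h2, hd2⟩ : _ ∧ _)]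
        · simp only [pvSplitHeso, if_neg (fun hx => hd2 hx.2 : ¬(_ ∧ _)), if_pos hd1,
            if_pos (⟨h1, hd1⟩ : _ ∧ _)]
          rw [List.drop_eq_getElem_cons h2]
      · simp only [pvSplitHeso, if_neg (fun hx => hd1 hx.1 : ¬(_ ∧ _)), if_neg hd1,
          if_neg (fun hx => hd1 hx.2 : ¬(_ ∧ _))]
    · have hnil : cs.drop (i1+1) = [] := List.drop_eq_nil_of_le (by omega)
      have hc1 : cs.drop i1 = [cs[i1]] := by rw [List.drop_eq_getElem_cons h1, hnil]
      rw [hc1, hg1]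
      by_cases hd1 : PySem.Chars.isdigit cs[i1] = true
      · simp only [pvSplitHeso, if_pos hd1, if_pos (⟨h1, hd1⟩ : _ ∧ _),
          if_neg (fun hx => h2 hx.1 : ¬(_ ∧ _))]
        rw [← hnil]
      · simp only [pvSplitHeso, if_neg hd1, if_neg (fun hx => hd1 hx.2 : ¬(_ ∧ _))]
  · have hnil : cs.drop i1 = [] := List.drop_eq_nil_of_le (by omega)
    rw [hnil]
    simp only [pvSplitHeso, if_neg (fun hx => h1 hx.1 : ¬(_ ∧ _))]

theorem upd_corr (a : List (String × List String)) (k x : String) :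
    (if a.any (fun p => p.1 == k) = false then a ++ [(k, [x])] else pvModifyFirst a k x) =
      pvSetdefaultAppend a k x := by
  cases hb : a.any (fun p => p.1 == k) <;> simp [pvSetdefaultAppend, hb]

theorem loopA_eq (cs : List Char) (index l : Int) :
    ∀ (n i : Nat) (a : List (String × List String)), cs.length - i ≤ n →
      tachLoopA cs index l i a =
        (pvTokens (cs.drop i)).foldl
          (fun acc t =>
            pvSetdefaultAppend acc t.1
              ("x" ++ PySem.Int.toStr (index + l) ++ "=" ++ PySem.Int.toStr t.2)) a := by
  intro n
  induction n with
  | zero =>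
      intro i a hn
      have hge : ¬ i < cs.length := by omega
      have hnil : cs.drop i = [] := List.drop_eq_nil_of_le (by omega)
      rw [tachLoopA, if_neg hge, hnil]
      simp [pvTokens]
  | succ n ih =>
      intro i a hn
      by_cases h : i < cs.length
      · rw [tachLoopA, if_pos h]
        have hg : cs.getD i ' ' = cs[i] := List.getD_eq_getElem cs ' ' h
        rw [List.drop_eq_getElem_cons h]
        rw [pvTokens]
        simp only [← hg, chat_corr cs i]
        by_cases h2 : i+1 < cs.length ∧ PySem.Chars.isdigit (cs.getD (i+1) ' ') = false
            ∧ PySem.Chars.isupper (cs.getD (i+1) ' ') = false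
        · simp only [if_pos h2]
          rw [heso_corr cs (i+2)]
          by_cases hA : i+2 < cs.length ∧ PySem.Chars.isdigit (cs.getD (i+2) ' ') = true
          · by_cases hB : i+3 < cs.length ∧ PySem.Chars.isdigit (cs.getD (i+3) ' ') = true
            · simp only [if_pos hA, show i+2+1 = i+3 from rfl, if_pos hB, List.foldl_cons, upd_corr]
              exact ih (i+4) _ (by omega)
            · simp only [if_pos hA, show i+2+1 = i+3 from rfl, if_neg hB, List.foldl_cons, upd_corr]
              exact ih (i+3) _ (by omega)
          · simp only [if_neg hA, List.foldl_cons, upd_corr]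
            exact ih (i+2) _ (by omega)
        · simp only [if_neg h2]
          rw [heso_corr cs (i+1)]
          by_cases hA : i+1 < cs.length ∧ PySem.Chars.isdigit (cs.getD (i+1) ' ') = true
          · by_cases hB : i+2 < cs.length ∧ PySem.Chars.isdigit (cs.getD (i+2) ' ') = true
            · simp only [if_pos hA, show i+1+1 = i+2 from rfl, if_pos hB, List.foldl_cons, upd_corr]
              exact ih (i+3) _ (by omega)
            · simp only [if_pos hA, show i+1+1 = i+2 from rfl, if_neg hB, List.foldl_cons, upd_corr]
              exact ih (i+2) _ (by omega)
          · simp only [if_neg hA, List.foldl_cons, upd_corr]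
            exact ih (i+1) _ (by omega)
      · have hnil : cs.drop i = [] := List.drop_eq_nil_of_le (by omega)
        rw [tachLoopA, if_neg h, hnil]
        simp [pvTokens]

-- ===== VERDICT (by name: the statement is the Claim_ definition above) =====
theorem tach_chat_spec : Claim_equal_tach_chat := by
  intro s index a l _hd
  unfold Spec_tach_chat tach_chat tach_chat_alt
  have := loopA_eq s.toList index l s.toList.length 0 a (by omega)
  simpa using this
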